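-- pv_equiv track=rewrite | github.com/digitalgoldfisj79/Voynich | scripts/p69b_segment_with_lattice.py | best_rule_match
-- ===== SOURCE A (Python) =====
-- def edit_distance_leq1(a: str, b: str) -> int:
--     """
--     Return edit distance if <=1, else return a value >1 quickly.
--
--     Optimized for small differences:
--     - If identical: 0
--     - If lengths differ by >1: treat as >1
--     - Check single insert/delete/substitution cases.
--     """
--     if a == b:
--         return 0
--     la, lb = len(a), len(b)
--     if abs(la - lb) > 1:
--         return 2  # >1
--
--     # Case 1: same length -> allow up to one substitution
--     if la == lb:
--         diff = 0
--         for ca, cb in zip(a, b):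
--             if ca != cb:
--                 diff += 1
--                 if diff > 1:
--                     return 2
--         return diff  # 1 if exactly one mismatch
--
--     # Case 2: length differs by exactly 1 -> one insert/delete
--     # Ensure a is the longer
--     if la < lb:
--         a, b = b, a
--         la, lb = lb, la
--
--     # Now la = lb + 1; try to align with one deletion in a
--     i = j = 0
--     diff = 0
--     while i < la and j < lb:
--         if a[i] == b[j]:
--             i += 1
--             j += 1
--         else:
--             diff += 1
--             if diff > 1:
--                 return 2
--             i += 1  # skip one char in longer string
--     # If we exited with at most one extra char, it's fine
--     return diff if diff <= 1 else 2
--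
-- def best_rule_match(token: str, rules):
--     """
--     For a given token, find the best matching rule based on:
--     - minimal edit distance to full form (<=1),
--     - then higher support,
--     - then rule_id (due to sorted input).
--     Returns (rule, dist) or (None, None).
--     """
--     best = None
--     best_dist = 2  # >1 means reject
--     for r in rules:
--         full = r["full"]
--         # quick length filter
--         if abs(len(token) - len(full)) > 1:
--             continue
--         d = edit_distance_leq1(token, full)
--         if d < best_dist:
--             best = r
--             best_dist = d
--             if d == 0:
--                 break  # exact match, cannot improve
--     if best is None or best_dist > 1:
--         return None, None
--     return best, best_dist
-- ===== SOURCE B (Python) =====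
-- def dist_leq1(a: str, b: str) -> int:
--     """True edit distance of a and b if <= 1, else 2.
--
--     Declarative characterization instead of a greedy alignment loop:
--     distance 0 iff equal; with equal lengths, distance 1 iff exactly one
--     mismatched position; with lengths off by one, distance 1 iff deleting
--     the longer string's character at the first mismatch yields the shorter.
--     """
--     if a == b:
--         return 0
--     la, lb = len(a), len(b)
--     if la == lb:
--         return 1 if sum(x != y for x, y in zip(a, b)) == 1 else 2
--     if abs(la - lb) != 1:
--         return 2
--     lo, hi = (a, b) if la < lb else (b, a)
--     k = next((i for i in range(len(lo)) if lo[i] != hi[i]), len(lo))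
--     return 1 if hi[:k] + hi[k + 1:] == lo else 2
--
-- def best_rule_match(token: str, rules):
--     """Score every rule once, then take the lexicographic minimum of
--     (distance, position): minimal distance, earliest rule wins ties.
--     No explicit running-best loop and no break."""
--     scored = [(dist_leq1(token, r["full"]), i, r) for i, r in enumerate(rules)]
--     good = [t for t in scored if t[0] <= 1]
--     if not good:
--         return None, None
--     d, _, r = min(good, key=lambda t: (t[0], t[1]))
--     return r, d
-- ===== Notes on version B (the rewrite author's own statement) =====
-- stated objective: alternative
-- what changed: A's running-best loop with an early break and its hand-rolled greedy alignment are replaced by a score-filter-min pipeline: every rule is scored once with a declarative slice-based edit-distance-<=1 test (true distance), the scores are filtered to <=1, and the lexicographic minimum of (distance, position) picks the winner.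
-- intended difference: When the rule scan meets, before any exact match, a rule whose full form is the token plus or minus one trailing character, A's greedy loop reports edit distance 0 for the unequal pair and returns that rule with distance 0 (even skipping a later true exact match); B uses the true distance 1 there, so it keeps looking and reports 1, which is the intended behaviour. — e.g. on best_rule_match("a", [[("full", "ab")], [("full", "a")]]): A returns (some [("full", "ab")], some 0), B returns (some [("full", "a")], some 0)
-- outside the precondition, e.g. on best_rule_match('a', [{'full': 'a'}, {}]): A returns ({'full': 'a'}, 0), B raises KeyError
import Mathlib
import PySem

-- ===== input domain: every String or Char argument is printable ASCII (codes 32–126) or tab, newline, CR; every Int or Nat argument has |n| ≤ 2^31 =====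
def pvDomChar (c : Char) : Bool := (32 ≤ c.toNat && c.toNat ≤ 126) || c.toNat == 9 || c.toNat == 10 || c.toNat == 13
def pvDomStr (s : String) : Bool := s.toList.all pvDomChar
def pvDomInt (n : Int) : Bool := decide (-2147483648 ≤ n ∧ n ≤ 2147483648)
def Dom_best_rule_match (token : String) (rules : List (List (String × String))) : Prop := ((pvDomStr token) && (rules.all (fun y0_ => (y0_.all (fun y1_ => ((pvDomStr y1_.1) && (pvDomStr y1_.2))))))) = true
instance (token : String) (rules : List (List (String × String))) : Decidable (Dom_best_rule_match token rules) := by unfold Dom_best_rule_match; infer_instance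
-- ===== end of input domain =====

-- B replaces A's running-best loop (with early break) and its greedy alignment by a
-- score-filter-min pipeline using a declarative slice characterization of distance ≤ 1
-- (A misreports 0 when one string is the other plus one trailing char — see D_ below).

-- ===== PORT A =====
-- while-loop of the length-differs-by-one case of edit_distance_leq1 (first list is the longer);
-- the catch-all case is the loop exit followed by `return diff if diff <= 1 else 2`
def edGreedy : List Char → List Char → Int → Int
  | x :: xs, y :: ys, diff =>
      if x = y then edGreedy xs ys diff
      else if diff + 1 > 1 then 2 else edGreedy xs (y :: ys) (diff + 1)
  | _, _, diff => if diff ≤ 1 then diff else 2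
termination_by structural x _ _ => x

-- the `for ca, cb in zip(a, b)` mismatch-counting loop of the same-length case
def edSameLen : List Char → List Char → Int → Int
  | x :: xs, y :: ys, diff =>
      if x ≠ y then (if diff + 1 > 1 then 2 else edSameLen xs ys (diff + 1))
      else edSameLen xs ys diff
  | _, _, diff => diff

def edit_distance_leq1 (a b : String) : Int :=
  if a = b then 0
  else
    let la : Int := a.toList.length
    let lb : Int := b.toList.length
    if |la - lb| > 1 then 2
    else if la = lb then edSameLen a.toList b.toList 0
    else if la < lb then edGreedy b.toList a.toList 0   -- the a, b = b, a swap: run with the longer first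
    else edGreedy a.toList b.toList 0

-- r["full"]: first match in the association list; `none` is Python's KeyError (excluded by Pre_)
def scanA (token : String) : List (List (String × String)) → Option (List (String × String)) → Int →
    Option (List (String × String)) × Int
  | [], best, bd => (best, bd)
  | r :: rs, best, bd =>
      match List.lookup "full" r with
      | none => (best, bd)   -- KeyError in Python; such inputs are outside Pre_
      | some full =>
          if |(token.toList.length : Int) - (full.toList.length : Int)| > 1 then scanA token rs best bd
          else
            let d := edit_distance_leq1 token full
            if d < bd then
              if d = 0 then (some r, d)   -- break
              else scanA token rs (some r) d
            else scanA token rs best bd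

def best_rule_match (token : String) (rules : List (List (String × String))) :
    (Option (List (String × String))) × Option Int :=
  let s := scanA token rules none 2
  match s.1 with
  | none => (none, none)
  | some b => if s.2 > 1 then (none, none) else (some b, some s.2)

-- ===== PORT B =====
-- sum(x != y for x, y in zip(a, b))
def bCountMismatch : List Char → List Char → Int
  | x :: xs, y :: ys => (if x ≠ y then 1 else 0) + bCountMismatch xs ys
  | _, _ => 0

-- next((i for i in range(len(lo)) if lo[i] != hi[i]), len(lo));  hi is at least as long as lo
def bFirstMismatch : List Char → List Char → Nat
  | x :: xs, y :: ys => if x ≠ y then 0 else 1 + bFirstMismatch xs ys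
  | _, _ => 0

def dist_leq1 (a b : String) : Int :=
  if a = b then 0
  else
    let la : Int := a.toList.length
    let lb : Int := b.toList.length
    if la = lb then (if bCountMismatch a.toList b.toList = 1 then 1 else 2)
    else if ¬ (|la - lb| = 1) then 2
    else
      let lo := if la < lb then a.toList else b.toList
      let hi := if la < lb then b.toList else a.toList
      let k := bFirstMismatch lo hi
      if hi.take k ++ hi.drop (k + 1) = lo then 1 else 2

-- [(dist_leq1(token, r["full"]), i, r) for i, r in enumerate(rules)]
-- r["full"] missing is Python's KeyError, excluded by Pre_ (getD "" is never reached inside Pre_)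
def bScored (token : String) (rules : List (List (String × String))) :
    List (Int × Int × List (String × String)) :=
  (PySem.List.enumerate rules).map
    (fun p => (dist_leq1 token ((List.lookup "full" p.2).getD ""), p.1, p.2))

def best_rule_match_alt (token : String) (rules : List (List (String × String))) :
    (Option (List (String × String))) × Option Int :=
  let good := (bScored token rules).filter (fun t => t.1 ≤ 1)
  -- min(good, key=lambda t: (t[0], t[1])) with the empty-list default handled by the match
  match PySem.List.min2? good (fun t => t.1) (fun t => t.2.1) with
  | none => (none, none)
  | some t => (some t.2.2, some t.1)

-- ===== PRECONDITION & SPEC =====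
-- Pre_ excludes rule lists containing a dict without the key "full": Python's r["full"] raises
-- KeyError on such a rule (A still returns on a few of these inputs, when an exact match earlier
-- in the list breaks the scan before the bad rule is reached — see the cite in claim.json).
def Pre_best_rule_match (token : String) (rules : List (List (String × String))) : Prop :=
  ∀ r ∈ rules, (List.lookup "full" r).isSome
instance (token : String) (rules : List (List (String × String))) : Decidable (Pre_best_rule_match token rules) := by
  unfold Pre_best_rule_match; infer_instance

def pvWitness_best_rule_match : String × (List (List (String × String))) :=
  ("cat", [[("full", "cot")], [("full", "dog")]])

-- a and b are one trailing character apart (the shorter is a prefix of the longer)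
def quirkB (a b : String) : Bool :=
  (a.toList.length == b.toList.length + 1 && b.toList.isPrefixOf a.toList) ||
  (b.toList.length == a.toList.length + 1 && a.toList.isPrefixOf b.toList)

def dHolds (token : String) : List (List (String × String)) → Bool
  | [] => false
  | r :: rs =>
      match List.lookup "full" r with
      | none => false
      | some f => quirkB token f || (token != f && dHolds token rs)

-- On inputs whose rule scan meets a rule whose full form is the token plus or minus one trailing
-- character before any exact match, A reports edit distance 0 for that unequal pair and returns
-- that rule with distance 0 (breaking the scan early); B uses the true distance 1 there and
-- keeps looking, which is the intended behaviour.
def D_best_rule_match (token : String) (rules : List (List (String × String))) : Prop :=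
  dHolds token rules = true
instance (token : String) (rules : List (List (String × String))) : Decidable (D_best_rule_match token rules) := by
  unfold D_best_rule_match; infer_instance

def Spec_best_rule_match (token : String) (rules : List (List (String × String)))
    (out : (Option (List (String × String))) × Option Int) : Prop :=
  ¬ D_best_rule_match token rules → out = best_rule_match_alt token rules
instance (token : String) (rules : List (List (String × String))) (out : (Option (List (String × String))) × Option Int) : Decidable (Spec_best_rule_match token rules out) := by
  unfold Spec_best_rule_match; infer_instance

def pvDiffWitness_best_rule_match : String × (List (List (String × String))) :=
  ("a", [[("full", "ab")], [("full", "a")]])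

def pvDiffWitnessOut_best_rule_match :
    ((Option (List (String × String))) × Option Int) × ((Option (List (String × String))) × Option Int) :=
  ((some [("full", "ab")], some 0), (some [("full", "a")], some 0))

-- ===== CLAIM =====
def Claim_unchanged_best_rule_match : Prop := ∀ (token : String) (rules : List (List (String × String))), Dom_best_rule_match token rules → Pre_best_rule_match token rules → Spec_best_rule_match token rules (best_rule_match token rules)
def Claim_changed_best_rule_match : Prop := Dom_best_rule_match (pvDiffWitness_best_rule_match.1) (pvDiffWitness_best_rule_match.2) ∧ Pre_best_rule_match (pvDiffWitness_best_rule_match.1) (pvDiffWitness_best_rule_match.2) ∧ D_best_rule_match (pvDiffWitness_best_rule_match.1) (pvDiffWitness_best_rule_match.2) ∧ best_rule_match (pvDiffWitness_best_rule_match.1) (pvDiffWitness_best_rule_match.2) = pvDiffWitnessOut_best_rule_match.1 ∧ best_rule_match_alt (pvDiffWitness_best_rule_match.1) (pvDiffWitness_best_rule_match.2) = pvDiffWitnessOut_best_rule_match.2 ∧ pvDiffWitnessOut_best_rule_match.1 ≠ pvDiffWitnessOut_best_rule_match.2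
def Claim_exact_best_rule_match : Prop := ∀ (token : String) (rules : List (List (String × String))), Dom_best_rule_match token rules → Pre_best_rule_match token rules → D_best_rule_match token rules → best_rule_match token rules ≠ best_rule_match_alt token rules

-- ===== LEMMAS AND PROOFS =====

theorem bCountMismatch_nonneg (x : List Char) : ∀ y, 0 ≤ bCountMismatch x y := by
  induction x with
  | nil => intro y; simp [bCountMismatch]
  | cons a xs ih =>
      intro y
      cases y with
      | nil => simp [bCountMismatch]
      | cons b ys =>
          simp only [bCountMismatch]
          have := ih ys
          split <;> omega

theorem edSameLen_one (x : List Char) : ∀ y,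
    edSameLen x y 1 = if bCountMismatch x y = 0 then 1 else 2 := by
  induction x with
  | nil => intro y; simp [edSameLen, bCountMismatch]
  | cons a xs ih =>
      intro y
      cases y with
      | nil => simp [edSameLen, bCountMismatch]
      | cons b ys =>
          simp only [edSameLen, bCountMismatch]
          by_cases hab : a = b
          · simp [hab, ih ys]
          · have := bCountMismatch_nonneg xs ys
            simp only [hab, if_neg, ne_eq, not_false_eq_true, if_true, if_pos]
            norm_num
            omega

theorem edSameLen_zero (x : List Char) : ∀ y,
    edSameLen x y 0 =
      if bCountMismatch x y = 0 then 0 else if bCountMismatch x y = 1 then 1 else 2 := by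
  induction x with
  | nil => intro y; simp [edSameLen, bCountMismatch]
  | cons a xs ih =>
      intro y
      cases y with
      | nil => simp [edSameLen, bCountMismatch]
      | cons b ys =>
          simp only [edSameLen, bCountMismatch]
          by_cases hab : a = b
          · simp [hab, ih ys]
          · have := bCountMismatch_nonneg xs ys
            have h1 := edSameLen_one xs ys
            simp only [ne_eq, hab, not_false_eq_true, if_true]
            norm_num [h1]
            split <;> omega

theorem bCountMismatch_zero (x : List Char) : ∀ y, x.length = y.length →
    bCountMismatch x y = 0 → x = y := by
  induction x with
  | nil => intro y hl _; cases y with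
      | nil => rfl
      | cons b ys => simp at hl
  | cons a xs ih =>
      intro y hl h
      cases y with
      | nil => simp at hl
      | cons b ys =>
          simp only [bCountMismatch] at h
          have h0 := bCountMismatch_nonneg xs ys
          by_cases hab : a = b
          · simp only [hab, ne_eq, not_true_eq_false, if_neg, not_false_eq_true] at h
            simp at h
            have := ih ys (by simpa using hl) (by omega)
            simp [hab, this]
          · simp [hab] at h
            omega

theorem edGreedy_one (x : List Char) : ∀ y, x.length = y.length →
    edGreedy x y 1 = if x = y then 1 else 2 := by
  induction x with
  | nil =>
      intro y hl
      cases y with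
      | nil => simp [edGreedy]
      | cons b ys => simp at hl
  | cons a xs ih =>
      intro y hl
      cases y with
      | nil => simp at hl
      | cons b ys =>
          simp only [edGreedy]
          by_cases hab : a = b
          · have := ih ys (by simpa using hl)
            simp [hab, this]
          · simp [hab]

theorem edGreedy_zero (y : List Char) : ∀ x, x.length = y.length + 1 →
    ¬ y.isPrefixOf x →
    edGreedy x y 0 =
      (if x.take (bFirstMismatch y x) ++ x.drop (bFirstMismatch y x + 1) = y then 1 else 2) := by
  induction y with
  | nil =>
      intro x _ hp
      exact absurd (by simp [List.isPrefixOf]) hp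
  | cons b ys ih =>
      intro x hl hp
      cases x with
      | nil => simp at hl
      | cons a xs =>
          by_cases hab : a = b
          · subst hab
            have hp' : ¬ ys.isPrefixOf xs := by
              intro h; exact hp (by simp [List.isPrefixOf, h])
            have hx : xs.length = ys.length + 1 := by simpa using hl
            have := ih xs hx hp'
            simp only [edGreedy, this, bFirstMismatch]
            simp only [ne_eq, not_true_eq_false, if_neg, not_false_eq_true, if_false]
            rw [show (1 + bFirstMismatch ys xs) = bFirstMismatch ys xs + 1 from by omega]
            simp [List.take_succ_cons, List.drop_succ_cons]
          · have hx : xs.length = (b :: ys).length := by simp at hl ⊢; omega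
            have h1 := edGreedy_one xs (b :: ys) hx
            have hba : ¬ b = a := fun hh => hab hh.symm
            have hk : bFirstMismatch (b :: ys) (a :: xs) = 0 := by simp [bFirstMismatch, hba]
            simp only [edGreedy, if_neg hab, hk]
            norm_num [h1]

theorem absgt1 (m n : Nat) : (|(m : Int) - (n : Int)| > 1) ↔ (m + 1 < n ∨ n + 1 < m) := by
  rcases le_total ((m : Int)) (n : Int) with h | h
  · rw [abs_of_nonpos (by omega)]; omega
  · rw [abs_of_nonneg (by omega)]; omega

theorem abseq1 (m n : Nat) : (|(m : Int) - (n : Int)| = 1) ↔ (m = n + 1 ∨ n = m + 1) := by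
  rcases le_total ((m : Int)) (n : Int) with h | h
  · rw [abs_of_nonpos (by omega)]; omega
  · rw [abs_of_nonneg (by omega)]; omega

theorem dist_eq (a b : String) (h : quirkB a b = false) :
    edit_distance_leq1 a b = dist_leq1 a b := by
  by_cases hab : a = b
  · simp [edit_distance_leq1, dist_leq1, hab]
  · have hlist : a.toList ≠ b.toList := fun hl => hab (String.toList_inj.mp hl)
    simp only [quirkB, Bool.or_eq_false_iff, Bool.and_eq_false_iff] at h
    obtain ⟨h1, h2⟩ := h
    simp only [edit_distance_leq1, dist_leq1, if_neg hab]
    rcases Nat.lt_trichotomy a.toList.length b.toList.length with hlt | heq | hgt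
    · -- a shorter than b
      have c2 : ¬((a.toList.length : Int) = (b.toList.length : Int)) := by omega
      have c3 : ((a.toList.length : Int) < (b.toList.length : Int)) := by omega
      by_cases hone : b.toList.length = a.toList.length + 1
      · -- off by one: A runs the greedy loop on (b, a); B checks the slice condition
        have hpre : ¬ a.toList.isPrefixOf b.toList := by
          rcases h2 with h2 | h2
          · exact absurd hone (by simpa using h2)
          · intro hh; rw [h2] at hh; exact absurd hh (by simp)
        have c1 : ¬(|(a.toList.length : Int) - (b.toList.length : Int)| > 1) := by
          simp only [absgt1]; omega
        have c4 : ¬¬(|(a.toList.length : Int) - (b.toList.length : Int)| = 1) := by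
          simp only [abseq1]; omega
        simp only [if_neg c1, if_neg c2, if_pos c3, if_neg c4]
        exact edGreedy_zero a.toList b.toList (by omega) hpre
      · -- length gap ≥ 2: both sides give 2
        have c1 : (|(a.toList.length : Int) - (b.toList.length : Int)| > 1) := by
          simp only [absgt1]; omega
        have c4 : ¬(|(a.toList.length : Int) - (b.toList.length : Int)| = 1) := by
          simp only [abseq1]; omega
        simp only [if_pos c1, if_neg c2, if_pos c4]
    · -- equal lengths
      have hc0 : bCountMismatch a.toList b.toList ≠ 0 :=
        fun hc => hlist (bCountMismatch_zero _ _ heq hc)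
      have c1 : ¬(|(a.toList.length : Int) - (b.toList.length : Int)| > 1) := by
        simp only [absgt1]; omega
      have c2 : ((a.toList.length : Int) = (b.toList.length : Int)) := by omega
      simp only [if_neg c1, if_pos c2, edSameLen_zero, if_neg hc0]
    · -- b shorter than a
      have c2 : ¬((a.toList.length : Int) = (b.toList.length : Int)) := by omega
      have c3 : ¬((a.toList.length : Int) < (b.toList.length : Int)) := by omega
      by_cases hone : a.toList.length = b.toList.length + 1
      · have hpre : ¬ b.toList.isPrefixOf a.toList := by
          rcases h1 with h1 | h1
          · exact absurd hone (by simpa using h1)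
          · intro hh; rw [h1] at hh; exact absurd hh (by simp)
        have c1 : ¬(|(a.toList.length : Int) - (b.toList.length : Int)| > 1) := by
          simp only [absgt1]; omega
        have c4 : ¬¬(|(a.toList.length : Int) - (b.toList.length : Int)| = 1) := by
          simp only [abseq1]; omega
        simp only [if_neg c1, if_neg c2, if_neg c3, if_neg c4]
        exact edGreedy_zero b.toList a.toList (by omega) hpre
      · have c1 : (|(a.toList.length : Int) - (b.toList.length : Int)| > 1) := by
          simp only [absgt1]; omega
        have c4 : ¬(|(a.toList.length : Int) - (b.toList.length : Int)| = 1) := by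
          simp only [abseq1]; omega
        simp only [if_pos c1, if_neg c2, if_pos c4]

theorem dist_leq1_nonneg (a b : String) : 0 ≤ dist_leq1 a b := by
  simp only [dist_leq1]
  split_ifs <;> norm_num

theorem dist_leq1_le_two (a b : String) : dist_leq1 a b ≤ 2 := by
  simp only [dist_leq1]
  split_ifs <;> norm_num

theorem dist_leq1_eq_zero (a b : String) (h : dist_leq1 a b = 0) : a = b := by
  by_contra hab
  revert h
  simp only [dist_leq1, if_neg hab]
  split_ifs <;> norm_num

theorem dist_leq1_of_gap (a b : String)
    (h : |(a.toList.length : Int) - (b.toList.length : Int)| > 1) : dist_leq1 a b = 2 := by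
  have hab : a ≠ b := by
    intro hh; subst hh; simp at h
  have c2 : ¬((a.toList.length : Int) = (b.toList.length : Int)) := by
    intro hh; rw [hh] at h; simp at h
  have c4 : ¬(|(a.toList.length : Int) - (b.toList.length : Int)| = 1) := by
    intro hh; rw [hh] at h; norm_num at h
  simp only [dist_leq1, if_neg hab, if_neg c2, if_pos c4]

-- proof-side helper: A's running-best loop rewritten to use B's (true) distance function
def scanC (token : String) : List (List (String × String)) → Option (List (String × String)) → Int →
    Option (List (String × String)) × Int
  | [], best, bd => (best, bd)
  | r :: rs, best, bd =>
      match List.lookup "full" r with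
      | none => (best, bd)
      | some full =>
          if |(token.toList.length : Int) - (full.toList.length : Int)| > 1 then scanC token rs best bd
          else
            let d := dist_leq1 token full
            if d < bd then
              if d = 0 then (some r, d)   -- break
              else scanC token rs (some r) d
            else scanC token rs best bd

-- proof-side helper: the post-processing A applies to its scan result
def pvPost (s : Option (List (String × String)) × Int) :
    Option (List (String × String)) × Option Int :=
  match s.1 with
  | none => (none, none)
  | some b => if s.2 > 1 then (none, none) else (some b, some s.2)

theorem scan_eq (token : String) : ∀ (rules : List (List (String × String)))
    (best : Option (List (String × String))) (bd : Int), 0 < bd →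
    (∀ r ∈ rules, (List.lookup "full" r).isSome) →
    dHolds token rules = false →
    scanA token rules best bd = scanC token rules best bd := by
  intro rules
  induction rules with
  | nil => intro best bd _ _ _; rfl
  | cons r rs ih =>
      intro best bd hbd hpre hd
      obtain ⟨full, hfull⟩ := Option.isSome_iff_exists.mp (hpre r (by simp))
      have hpre' : ∀ r' ∈ rs, (List.lookup "full" r').isSome := fun r' hr' => hpre r' (by simp [hr'])
      simp only [dHolds, hfull, Bool.or_eq_false_iff, Bool.and_eq_false_iff] at hd
      obtain ⟨hq, hrest⟩ := hd
      have heqfull : (token != full) = false → token = full := by simp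
      have hdist := dist_eq token full hq
      simp only [scanA, scanC, hfull, hdist]
      by_cases hf : |(token.toList.length : Int) - (full.toList.length : Int)| > 1
      · simp only [if_pos hf]
        apply ih best bd hbd hpre'
        rcases hrest with hrest | hrest
        · exfalso
          rw [heqfull hrest] at hf
          simp at hf
        · exact hrest
      · simp only [if_neg hf]
        by_cases hlt : dist_leq1 token full < bd
        · simp only [if_pos hlt]
          by_cases h0 : dist_leq1 token full = 0
          · simp [h0]
          · simp only [if_neg h0]
            have hd' : dHolds token rs = false := by
              rcases hrest with hrest | hrest
              · exact absurd (by rw [heqfull hrest]; simp [dist_leq1]) h0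
              · exact hrest
            exact ih (some r) (dist_leq1 token full)
              (by have := dist_leq1_nonneg token full; omega) hpre' hd'
        · simp only [if_neg hlt]
          have hd' : dHolds token rs = false := by
            rcases hrest with hrest | hrest
            · exfalso
              apply hlt
              rw [heqfull hrest]
              simp [dist_leq1]
              omega
            · exact hrest
          exact ih best bd hbd hpre' hd'

-- proof-side helpers for the min2? fold of port B
def gMin (acc : Option (Int × Int × List (String × String)))
    (x : Int × Int × List (String × String)) : Option (Int × Int × List (String × String)) :=
  match acc with
  | none => some x
  | some m =>
      if (decide (x.1 < m.1) || !decide (m.1 < x.1) && decide (x.2.1 < m.2.1)) = true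
      then some x else some m

def outMin : Option (Int × Int × List (String × String)) →
    (Option (List (String × String))) × Option Int
  | none => (none, none)
  | some t => (some t.2.2, some t.1)

def bScore (token : String) (p : Int × List (String × String)) :
    Int × Int × List (String × String) :=
  (dist_leq1 token ((List.lookup "full" p.2).getD ""), p.1, p.2)

theorem min2?_eq_foldl (xs : List (Int × Int × List (String × String))) :
    PySem.List.min2? xs (fun t => t.1) (fun t => t.2.1) = xs.foldl gMin none := by
  unfold PySem.List.min2?
  congr 1
  funext acc x
  cases acc with
  | none => rfl
  | some m => simp [gMin]

theorem foldl_gMin_stay (i : Int) (r : List (String × String)) :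
    ∀ (l : List (Int × Int × List (String × String))),
    (∀ x ∈ l, 0 ≤ x.1 ∧ i < x.2.1) →
    l.foldl gMin (some (0, i, r)) = some (0, i, r) := by
  intro l
  induction l with
  | nil => intro _; rfl
  | cons x xs ih =>
      intro h
      obtain ⟨hx, hxs⟩ := List.forall_mem_cons.mp h
      have hg : gMin (some (0, i, r)) x = some (0, i, r) := by
        simp only [gMin]
        have c : ¬ ((decide (x.1 < 0) || !decide ((0:Int) < x.1) && decide (x.2.1 < i)) = true) := by
          simp only [Bool.or_eq_true, Bool.and_eq_true, decide_eq_true_eq, Bool.not_eq_true',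
            decide_eq_false_iff_not]
          push_neg
          exact ⟨by omega, fun _ => by omega⟩
        simp [c]
      simp only [List.foldl_cons, hg]
      exact ih hxs

theorem mem_scored_bounds (token : String) (s : Int) (rs : List (List (String × String))) :
    ∀ x ∈ ((PySem.List.enumerate rs s).map (bScore token)).filter (fun t => t.1 ≤ 1),
      0 ≤ x.1 ∧ s ≤ x.2.1 := by
  intro x hx
  have hx' := List.mem_of_mem_filter hx
  obtain ⟨p, hp, hpx⟩ := List.mem_map.mp hx'
  obtain ⟨k, hk, hpk⟩ := (PySem.List.mem_enumerate_iff _ _ _).mp hp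
  subst hpx
  refine ⟨dist_leq1_nonneg _ _, ?_⟩
  simp only [bScore, hpk]
  omega

-- bridge: A's loop state (best, bd) corresponds to the min2? fold accumulator
theorem scanC_min (token : String) : ∀ (rs : List (List (String × String))) (s : Int)
    (best : Option (List (String × String))) (bd : Int)
    (acc : Option (Int × Int × List (String × String))),
    (∀ r ∈ rs, (List.lookup "full" r).isSome) →
    ((best = none ∧ bd = 2 ∧ acc = none) ∨
      (∃ r i, best = some r ∧ acc = some (bd, i, r) ∧ 0 ≤ bd ∧ bd ≤ 1 ∧ i < s)) →
    pvPost (scanC token rs best bd) =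
      outMin ((((PySem.List.enumerate rs s).map (bScore token)).filter (fun t => t.1 ≤ 1)).foldl gMin acc) := by
  intro rs
  induction rs with
  | nil =>
      intro s best bd acc _ hrel
      rcases hrel with ⟨h1, h2, h3⟩ | ⟨r, i, h1, h2, h3, h4, _⟩
      · subst h1; subst h2; subst h3; rfl
      · subst h1; subst h2
        simp only [scanC, PySem.List.enumerate, List.map_nil, List.filter_nil, List.foldl_nil,
          pvPost, outMin]
        rw [if_neg (by omega)]
  | cons r rs ih =>
      intro s best bd acc hpre hrel
      obtain ⟨full, hfull⟩ := Option.isSome_iff_exists.mp (hpre r (by simp))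
      have hpre' : ∀ r' ∈ rs, (List.lookup "full" r').isSome := fun r' hr' => hpre r' (by simp [hr'])
      have hd0 : 0 ≤ dist_leq1 token full := dist_leq1_nonneg token full
      have hd2 : dist_leq1 token full ≤ 2 := dist_leq1_le_two token full
      have hsc : bScore token (s, r) = (dist_leq1 token full, s, r) := by
        simp [bScore, hfull]
      rw [PySem.List.enumerate_cons]
      simp only [List.map_cons, hsc]
      by_cases hf : |(token.length : Int) - (full.length : Int)| > 1
      · -- length pre-filter fires in the loop; the pipeline scores it 2 and filters it out
        have h2 : dist_leq1 token full = 2 := dist_leq1_of_gap token full (by simpa using hf)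
        have hnot : ¬ ((dist_leq1 token full, s, r).1 ≤ 1) := by simp [h2]
        rw [show scanC token (r :: rs) best bd = scanC token rs best bd from by
          simp [scanC, hfull, hf]]
        rw [List.filter_cons_of_neg (by simpa using hnot)]
        apply ih (s + 1) best bd acc hpre'
        rcases hrel with ⟨h1, h2, h3⟩ | ⟨r0, i, h1, h2, h3, h4, h5⟩
        · exact Or.inl ⟨h1, h2, h3⟩
        · exact Or.inr ⟨r0, i, h1, h2, h3, h4, by omega⟩
      · by_cases hle : dist_leq1 token full ≤ 1
        · -- head survives the filter
          rw [List.filter_cons_of_pos (by simpa using hle), List.foldl_cons]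
          rcases hrel with ⟨h1, h2, h3⟩ | ⟨r0, i, h1, h2, h3, h4, h5⟩
          · -- no best yet: the head strictly improves (d ≤ 1 < 2)
            subst h1; subst h2; subst h3
            have hlt : dist_leq1 token full < 2 := by omega
            have hg : gMin none (dist_leq1 token full, s, r) = some (dist_leq1 token full, s, r) := rfl
            rw [hg]
            by_cases h0 : dist_leq1 token full = 0
            · rw [show scanC token (r :: rs) none 2 = (some r, dist_leq1 token full) from by
                simp [scanC, hfull, hf, hlt, h0]]
              rw [h0]
              rw [foldl_gMin_stay s r _ (fun x hx => by
                have := mem_scored_bounds token (s + 1) rs x hx; omega)]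
              simp [pvPost, outMin, h0]
            · rw [show scanC token (r :: rs) none 2 = scanC token rs (some r) (dist_leq1 token full) from by
                simp [scanC, hfull, hf, hlt, h0]]
              exact ih (s + 1) (some r) (dist_leq1 token full) _ hpre'
                (Or.inr ⟨r, s, rfl, rfl, hd0, hle, by omega⟩)
          · -- a best exists: head wins iff its distance is strictly smaller
            subst h1; subst h2
            have hgcond : (decide ((dist_leq1 token full, s, r).1 < bd) ||
                !decide (bd < (dist_leq1 token full, s, r).1) &&
                  decide ((dist_leq1 token full, s, r).2.1 < i)) =
                decide (dist_leq1 token full < bd) := by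
              by_cases hlt : dist_leq1 token full < bd
              · simp [hlt]
              · have : ¬ (s < i) := by omega
                simp [hlt, this]
            by_cases hlt : dist_leq1 token full < bd
            · -- strict improvement forces bd = 1, d = 0: the loop breaks
              have h0 : dist_leq1 token full = 0 := by omega
              have hbdpos : (0 : Int) < bd := by omega
              have hg : gMin (some (bd, i, r0)) (dist_leq1 token full, s, r) =
                  some (dist_leq1 token full, s, r) := by
                simp only [gMin, hgcond]
                simp [hlt]
              rw [hg]
              rw [show scanC token (r :: rs) (some r0) bd = (some r, dist_leq1 token full) from by
                simp [scanC, hfull, hf, hlt, h0, hbdpos]]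
              rw [h0]
              rw [foldl_gMin_stay s r _ (fun x hx => by
                have := mem_scored_bounds token (s + 1) rs x hx; omega)]
              simp [pvPost, outMin, h0]
            · have hg : gMin (some (bd, i, r0)) (dist_leq1 token full, s, r) =
                  some (bd, i, r0) := by
                simp only [gMin, hgcond]
                simp [hlt]
              rw [hg]
              rw [show scanC token (r :: rs) (some r0) bd = scanC token rs (some r0) bd from by
                simp [scanC, hfull, hf, hlt]]
              exact ih (s + 1) (some r0) bd _ hpre'
                (Or.inr ⟨r0, i, rfl, rfl, h3, h4, by omega⟩)
        · -- head scores 2 and is filtered out; the loop cannot improve either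
          have hnlt : ¬ (dist_leq1 token full < bd) := by
            rcases hrel with ⟨_, h2, _⟩ | ⟨_, _, _, _, _, h4, _⟩ <;> omega
          rw [List.filter_cons_of_neg (by simpa using hle)]
          rw [show scanC token (r :: rs) best bd = scanC token rs best bd from by
            simp [scanC, hfull, hf, hnlt]]
          apply ih (s + 1) best bd acc hpre'
          rcases hrel with ⟨h1, h2, h3⟩ | ⟨r0, i, h1, h2, h3, h4, h5⟩
          · exact Or.inl ⟨h1, h2, h3⟩
          · exact Or.inr ⟨r0, i, h1, h2, h3, h4, by omega⟩

theorem alt_eq_scanC (token : String) (rules : List (List (String × String)))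
    (hpre : ∀ r ∈ rules, (List.lookup "full" r).isSome) :
    best_rule_match_alt token rules = pvPost (scanC token rules none 2) := by
  have h := scanC_min token rules 0 none 2 none hpre (Or.inl ⟨rfl, rfl, rfl⟩)
  rw [h]
  simp only [best_rule_match_alt, bScored, min2?_eq_foldl]
  have hmap : (PySem.List.enumerate rules).map
      (fun p => (dist_leq1 token ((List.lookup "full" p.2).getD ""), p.1, p.2)) =
      (PySem.List.enumerate rules 0).map (bScore token) := rfl
  rw [hmap]
  rcases hres : (((PySem.List.enumerate rules 0).map (bScore token)).filter
      (fun t => t.1 ≤ 1)).foldl gMin none with _ | t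
  · simp [outMin]
  · simp [outMin]

theorem edGreedy_prefix (y : List Char) : ∀ x, x.length = y.length + 1 →
    y.isPrefixOf x → edGreedy x y 0 = 0 := by
  induction y with
  | nil =>
      intro x _ _
      cases x with
      | nil => simp [edGreedy]
      | cons a xs => simp [edGreedy]
  | cons b ys ih =>
      intro x hl hp
      cases x with
      | nil => simp at hl
      | cons a xs =>
          simp only [List.isPrefixOf, Bool.and_eq_true, beq_iff_eq] at hp
          obtain ⟨hba, hp⟩ := hp
          subst hba
          simp only [edGreedy, if_pos rfl]
          exact ih xs (by simpa using hl) hp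

theorem quirk_ne (a b : String) (hq : quirkB a b = true) : a ≠ b := by
  intro hab
  subst hab
  simp only [quirkB, Bool.or_eq_true, Bool.and_eq_true, beq_iff_eq] at hq
  omega

theorem quirk_editA (a b : String) (hq : quirkB a b = true) :
    edit_distance_leq1 a b = 0 := by
  have hab : a ≠ b := quirk_ne a b hq
  simp only [quirkB, Bool.or_eq_true, Bool.and_eq_true, beq_iff_eq] at hq
  simp only [edit_distance_leq1, if_neg hab]
  rcases hq with ⟨hlen, hpre⟩ | ⟨hlen, hpre⟩
  · -- a is the longer, b a prefix of a
    have c1 : ¬(|(a.toList.length : Int) - (b.toList.length : Int)| > 1) := by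
      simp only [absgt1]; omega
    have c2 : ¬((a.toList.length : Int) = (b.toList.length : Int)) := by omega
    have c3 : ¬((a.toList.length : Int) < (b.toList.length : Int)) := by omega
    simp only [if_neg c1, if_neg c2, if_neg c3]
    exact edGreedy_prefix b.toList a.toList hlen hpre
  · -- b is the longer, a a prefix of b
    have c1 : ¬(|(a.toList.length : Int) - (b.toList.length : Int)| > 1) := by
      simp only [absgt1]; omega
    have c2 : ¬((a.toList.length : Int) = (b.toList.length : Int)) := by omega
    have c3 : ((a.toList.length : Int) < (b.toList.length : Int)) := by omega
    simp only [if_neg c1, if_neg c2, if_pos c3]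
    exact edGreedy_prefix a.toList b.toList hlen hpre

theorem quirk_filter (a b : String) (hq : quirkB a b = true) :
    ¬(|(a.toList.length : Int) - (b.toList.length : Int)| > 1) := by
  simp only [quirkB, Bool.or_eq_true, Bool.and_eq_true, beq_iff_eq] at hq
  simp only [absgt1]
  omega

theorem scanC_zero (token : String) : ∀ (rs : List (List (String × String)))
    (best : Option (List (String × String))) (bd : Int), 0 < bd →
    (scanC token rs best bd).2 = 0 →
    ∃ r2, (scanC token rs best bd).1 = some r2 ∧ List.lookup "full" r2 = some token := by
  intro rs
  induction rs with
  | nil => intro best bd hbd h; exfalso; have hbd0 : bd = 0 := h; omega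
  | cons r rs ih =>
      intro best bd hbd h
      rcases hfull : List.lookup "full" r with _ | full
      · rw [show scanC token (r :: rs) best bd = (best, bd) from by simp [scanC, hfull]] at h
        exfalso; have hbd0 : bd = 0 := h; omega
      · by_cases hflt : (1 : Int) < |(token.length : Int) - (full.length : Int)|
        · rw [show scanC token (r :: rs) best bd = scanC token rs best bd from by
            simp [scanC, hfull, hflt]] at h ⊢
          exact ih best bd hbd h
        · by_cases h0 : dist_leq1 token full = 0
          · rw [show scanC token (r :: rs) best bd = (some r, dist_leq1 token full) from by
              simp [scanC, hfull, hflt, h0, hbd]] at h ⊢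
            exact ⟨r, rfl, by rw [hfull, dist_leq1_eq_zero token full h0]⟩
          · by_cases hlt : dist_leq1 token full < bd
            · rw [show scanC token (r :: rs) best bd = scanC token rs (some r) (dist_leq1 token full) from by
                simp [scanC, hfull, hflt, hlt, h0]] at h ⊢
              exact ih (some r) _ (by have := dist_leq1_nonneg token full; omega) h
            · rw [show scanC token (r :: rs) best bd = scanC token rs best bd from by
                simp [scanC, hfull, hflt, hlt]] at h ⊢
              exact ih best bd hbd h

theorem scan_ne (token : String) : ∀ (rs : List (List (String × String)))
    (best : Option (List (String × String))) (bd : Int), 0 < bd →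
    (∀ r ∈ rs, (List.lookup "full" r).isSome) →
    dHolds token rs = true →
    pvPost (scanA token rs best bd) ≠ pvPost (scanC token rs best bd) := by
  intro rs
  induction rs with
  | nil => intro best bd _ _ hd; exact absurd hd (by simp [dHolds])
  | cons r rs ih =>
      intro best bd hbd hpre hd
      obtain ⟨full, hfull⟩ := Option.isSome_iff_exists.mp (hpre r (by simp))
      have hpre' : ∀ r' ∈ rs, (List.lookup "full" r').isSome := fun r' hr' => hpre r' (by simp [hr'])
      simp only [dHolds, hfull, Bool.or_eq_true, Bool.and_eq_true, bne_iff_ne] at hd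
      by_cases hq : quirkB token full = true
      · -- the quirk rule: A breaks with distance 0; C's result cannot be (some r, some 0)
        have hflt : ¬ (1 : Int) < |(token.length : Int) - (full.length : Int)| := by
          simpa using quirk_filter token full hq
        have hA : scanA token (r :: rs) best bd = (some r, 0) := by
          have h0 := quirk_editA token full hq
          simp [scanA, hfull, hflt, h0, hbd]
        have hne : token ≠ full := quirk_ne token full hq
        rw [hA]
        intro heq
        rcases hs1 : (scanC token (r :: rs) best bd).1 with _ | b
        · rw [show pvPost (scanC token (r :: rs) best bd) = (none, none) from by
            simp [pvPost, hs1]] at heq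
          simp [pvPost] at heq
        · by_cases hs2 : (scanC token (r :: rs) best bd).2 > 1
          · rw [show pvPost (scanC token (r :: rs) best bd) = (none, none) from by
              simp [pvPost, hs1, hs2]] at heq
            simp [pvPost] at heq
          · rw [show pvPost (scanC token (r :: rs) best bd) =
                (some b, some (scanC token (r :: rs) best bd).2) from by
              simp [pvPost, hs1, hs2]] at heq
            have hL : pvPost ((some r : Option (List (String × String))), (0 : Int)) =
                (some r, some (0 : Int)) := by simp [pvPost]
            rw [hL, Prod.ext_iff] at heq
            obtain ⟨hbr, h2⟩ := heq
            have h2' : (scanC token (r :: rs) best bd).2 = 0 := (Option.some_inj.mp h2).symm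
            obtain ⟨r2, hr2, hr2full⟩ := scanC_zero token (r :: rs) best bd hbd h2'
            rw [hs1] at hr2
            have hr2r : r2 = r := by
              rw [Option.some_inj.mp hbr]
              exact (Option.some_inj.mp hr2).symm
            rw [hr2r, hfull] at hr2full
            exact hne (Option.some_inj.mp hr2full).symm
      · -- not the quirk rule: both sides treat it identically and the region is in the tail
        have hq' : quirkB token full = false := by simpa using hq
        obtain ⟨htok, hdrs⟩ : token ≠ full ∧ dHolds token rs = true := by
          rcases hd with hd | hd
          · exact absurd hd hq
          · exact hd
        have hdist := dist_eq token full hq'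
        have h0 : dist_leq1 token full ≠ 0 := fun h0 => htok (dist_leq1_eq_zero token full h0)
        by_cases hflt : (1 : Int) < |(token.length : Int) - (full.length : Int)|
        · rw [show scanA token (r :: rs) best bd = scanA token rs best bd from by
              simp [scanA, hfull, hflt],
            show scanC token (r :: rs) best bd = scanC token rs best bd from by
              simp [scanC, hfull, hflt]]
          exact ih best bd hbd hpre' hdrs
        · by_cases hlt : dist_leq1 token full < bd
          · rw [show scanA token (r :: rs) best bd = scanA token rs (some r) (dist_leq1 token full) from by
                simp [scanA, hfull, hflt, hdist, hlt, h0],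
              show scanC token (r :: rs) best bd = scanC token rs (some r) (dist_leq1 token full) from by
                simp [scanC, hfull, hflt, hlt, h0]]
            exact ih (some r) _ (by have := dist_leq1_nonneg token full; omega) hpre' hdrs
          · rw [show scanA token (r :: rs) best bd = scanA token rs best bd from by
                simp [scanA, hfull, hflt, hdist, hlt],
              show scanC token (r :: rs) best bd = scanC token rs best bd from by
                simp [scanC, hfull, hflt, hlt]]
            exact ih best bd hbd hpre' hdrs

-- ===== VERDICT =====
theorem best_rule_match_spec : Claim_unchanged_best_rule_match := by
  intro token rules _ hpre
  unfold Spec_best_rule_match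
  intro hD
  have hd : dHolds token rules = false := by
    unfold D_best_rule_match at hD
    simpa using hD
  rw [alt_eq_scanC token rules hpre]
  rw [show best_rule_match token rules = pvPost (scanA token rules none 2) from rfl]
  rw [scan_eq token rules none 2 (by norm_num) hpre hd]

theorem best_rule_match_changed : Claim_changed_best_rule_match := by
  unfold Claim_changed_best_rule_match; decide

theorem best_rule_match_tight : Claim_exact_best_rule_match := by
  intro token rules hdom hpre hD
  have hd : dHolds token rules = true := hD
  have hne := scan_ne token rules none 2 (by norm_num) hpre hd
  rw [show best_rule_match token rules = pvPost (scanA token rules none 2) from rfl,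
    alt_eq_scanC token rules hpre]
  exact hne
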